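-- pv_equiv track=rewrite | github.com/griffone/codificador_interfaz | script.py | hdb3
-- ===== SOURCE A (Python) =====
-- def hdb3(bit_sequence):
--     encoded_sequence = ''
--     current_polarity = '1'
--     zero_count = 0
--     one_count = 0
--
--     for bit in bit_sequence:
--         if bit == '1':
--             encoded_sequence += current_polarity
--             current_polarity = '1' if current_polarity == 'N' else 'N'
--             one_count += 1
--             zero_count = 0
--         else:
--             zero_count += 1
--             if zero_count == 4:
--                 if one_count % 2 == 0:
--                     encoded_sequence = encoded_sequence[:-3] + current_polarity + '00' + current_polarity
--                 else:
--                     encoded_sequence += current_polarity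
--                 zero_count = 0
--                 one_count = 0
--             else:
--                 encoded_sequence += '0'
--
--     return encoded_sequence
-- ===== SOURCE B (Python) =====
-- def hdb3(bit_sequence):
--     # Run-length decomposition: split the input into maximal runs of '1's and
--     # non-'1's; a run of m ones emits m alternating polarities, a run of k
--     # "zeros" emits k//4 substitution blocks (first by one-count parity, the
--     # rest B00V) plus k%4 literal zeros.  Output is append-only, no rewriting.
--     parts = []
--     pol = '1'
--     parity = 0  # one_count % 2
--     i = 0
--     n = len(bit_sequence)
--     while i < n:
--         j = i
--         if bit_sequence[i] == '1':
--             while j < n and bit_sequence[j] == '1':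
--                 j += 1
--             for _ in range(j - i):
--                 parts.append(pol)
--                 pol = '1' if pol == 'N' else 'N'
--             parity = (parity + (j - i)) % 2
--         else:
--             while j < n and bit_sequence[j] != '1':
--                 j += 1
--             q, r = divmod(j - i, 4)
--             if q > 0:
--                 first = pol + '00' + pol if parity == 0 else '000' + pol
--                 parts.append(first + (pol + '00' + pol) * (q - 1))
--                 parity = 0
--             parts.append('0' * r)
--         i = j
--     return ''.join(parts)
-- ===== Notes on version B (the rewrite author's own statement) =====
-- stated objective: faster
-- what changed: Replaces A's per-character state machine with [:-3] output rewriting by a run-length decomposition: the input is split into maximal runs of '1'/non-'1' characters and each run is emitted in one append-only step (alternating polarities for a ones-run; k//4 substitution blocks plus k%4 literal zeros, computed by divmod, for a zeros-run).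
import Mathlib
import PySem

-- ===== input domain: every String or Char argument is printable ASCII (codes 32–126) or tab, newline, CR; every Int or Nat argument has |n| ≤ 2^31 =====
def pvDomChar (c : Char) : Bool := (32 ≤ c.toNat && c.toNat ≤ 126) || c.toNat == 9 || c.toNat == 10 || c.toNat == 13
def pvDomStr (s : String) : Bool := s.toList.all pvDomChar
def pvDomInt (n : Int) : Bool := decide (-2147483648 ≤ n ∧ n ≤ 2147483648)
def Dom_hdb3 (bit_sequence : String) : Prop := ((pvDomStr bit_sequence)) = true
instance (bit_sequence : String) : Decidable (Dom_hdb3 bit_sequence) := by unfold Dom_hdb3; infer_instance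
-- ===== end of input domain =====

-- B replaces A's per-character state machine with [:-3] output rewriting by a run-length
-- decomposition (maximal runs of '1'/non-'1', each run emitted in one append-only step via
-- divmod arithmetic); measured faster in a timing run (no repeated slice+rebuild).

-- ===== PORT A =====
-- '1' if current_polarity == 'N' else 'N'
def pvToggle (p : Char) : Char := if p = 'N' then '1' else 'N'

-- loop body of A; state = (encoded_sequence, current_polarity, zero_count, one_count)
def pvStepA : (List Char × Char × Int × Int) → Char → (List Char × Char × Int × Int)
  | (enc, pol, zeros, ones), bit =>
    if bit = '1' then
      (enc ++ [pol], pvToggle pol, 0, ones + 1)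
    else
      let z := zeros + 1
      if z = 4 then
        if PySem.Int.mod ones 2 = 0 then
          -- encoded_sequence[:-3] + current_polarity + '00' + current_polarity
          (PySem.List.slice enc none (some (-3)) ++ pol :: '0' :: '0' :: [pol], pol, 0, 0)
        else
          (enc ++ [pol], pol, 0, 0)
      else
        (enc ++ ['0'], pol, z, ones)

def hdb3 (bit_sequence : String) : String :=
  String.ofList ((bit_sequence.toList.foldl pvStepA ([], '1', 0, 0)).1)

-- ===== PORT B =====
-- '1' if pol == 'N' else 'N'
def pvFlip (p : Char) : Char := if p = 'N' then '1' else 'N'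

-- the `for _ in range(m): parts.append(pol); pol = flip(pol)` loop: emitted chars and final pol
def pvOnesOut (pol : Char) : Nat → List Char
  | 0 => []
  | m + 1 => pol :: pvOnesOut (pvFlip pol) m

def pvFlipIter (pol : Char) : Nat → Char
  | 0 => pol
  | m + 1 => pvFlipIter (pvFlip pol) m

-- pol + '00' + pol
def pvBlock (pol : Char) : List Char := pol :: '0' :: '0' :: [pol]

-- (pol + '00' + pol) * q
def pvBlocks (pol : Char) : Nat → List Char
  | 0 => []
  | q + 1 => pvBlock pol ++ pvBlocks pol q

-- what a maximal run of k non-'1' characters emits: q = k//4 blocks, then '0'*(k%4)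
def pvZerosOut (pol : Char) (parity : Int) (k : Nat) : List Char :=
  (if k / 4 = 0 then []
   else (if parity = 0 then pvBlock pol else '0' :: '0' :: '0' :: [pol]) ++ pvBlocks pol (k / 4 - 1))
  ++ List.replicate (k % 4) '0'

-- the outer while loop: consume one maximal run per call
def pvEncodeRuns : List Char → Char → Int → List Char
  | [], _, _ => []
  | c :: rest, pol, parity =>
    if c = '1' then
      let m := (List.takeWhile (fun b => b = '1') (c :: rest)).length
      pvOnesOut pol m ++
        pvEncodeRuns (List.dropWhile (fun b => b = '1') (c :: rest)) (pvFlipIter pol m)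
          (PySem.Int.mod (parity + (m : Int)) 2)
    else
      let k := (List.takeWhile (fun b => ¬ b = '1') (c :: rest)).length
      pvZerosOut pol parity k ++
        pvEncodeRuns (List.dropWhile (fun b => ¬ b = '1') (c :: rest)) pol
          (if k / 4 = 0 then parity else 0)
termination_by l => l.length
decreasing_by
  all_goals
    simp only [List.dropWhile_cons]
    split
    · have := List.length_dropWhile_le (fun b => decide (b = '1')) rest
      have := List.length_dropWhile_le (fun b => decide ¬(b = '1')) rest
      simp at *; omega
    · simp_all

def hdb3_alt (bit_sequence : String) : String :=
  String.ofList (pvEncodeRuns bit_sequence.toList '1' 0)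

-- ===== PRECONDITION & SPEC =====
def Spec_hdb3 (bit_sequence : String) (out : String) : Prop := out = hdb3_alt bit_sequence
instance (bit_sequence : String) (out : String) : Decidable (Spec_hdb3 bit_sequence out) := by unfold Spec_hdb3; infer_instance

-- ===== CLAIM (what is proved, stated in full; the proofs are below) =====
def Claim_equal_hdb3 : Prop := ∀ (bit_sequence : String), Dom_hdb3 bit_sequence → Spec_hdb3 bit_sequence (hdb3 bit_sequence)

-- ===== LEMMAS AND PROOFS =====

-- Proof-only intermediate: a deferred-zero version of A's loop (append-only output, pending
-- zeros in the counter), used as a bridge between A's foldl and B's run decomposition.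
def pvStepD : (List Char × Char × Int × Int) → Char → (List Char × Char × Int × Int)
  | (out, pol, zeros, ones), bit =>
    if bit = '1' then
      (out ++ List.replicate zeros.toNat '0' ++ [pol], pvToggle pol, 0, ones + 1)
    else
      let z := zeros + 1
      if z = 4 then
        (out ++ (if PySem.Int.mod ones 2 = 0 then pvBlock pol
                 else '0' :: '0' :: '0' :: [pol]), pol, 0, 0)
      else
        (out, pol, z, ones)

-- Python's % by 2 (positive divisor) is Lean's emod
theorem pv_mod2 (a : Int) : PySem.Int.mod a 2 = a % 2 := by
  rcases PySem.Int.mod_two_eq a with h | h <;> rw [h]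
  · have := (PySem.Int.mod_eq_zero_iff_dvd a 2).mp h
    omega
  · have hnd : ¬ (2 : Int) ∣ a := by
      intro hd
      have := (PySem.Int.mod_eq_zero_iff_dvd a 2).mpr hd
      omega
    omega

-- A's output is the deferred loop's output plus the pending zeros (at most 3 of them).
theorem pv_loop_eq (l : List Char) (acc : List Char) (pol : Char) (zeros ones : Int)
    (h0 : 0 ≤ zeros) (h3 : zeros ≤ 3) :
    (l.foldl pvStepA (acc ++ List.replicate zeros.toNat '0', pol, zeros, ones)).1
      = (l.foldl pvStepD (acc, pol, zeros, ones)).1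
        ++ List.replicate (l.foldl pvStepD (acc, pol, zeros, ones)).2.2.1.toNat '0' := by
  induction l generalizing acc pol zeros ones with
  | nil => simp
  | cons c l ih =>
    by_cases h1 : c = '1'
    · have := ih (acc ++ List.replicate zeros.toNat '0' ++ [pol]) (pvToggle pol) 0 (ones + 1)
        (by omega) (by omega)
      simpa [pvStepA, pvStepD, h1] using this
    · by_cases h4 : zeros + 1 = 4
      · have hz : zeros = 3 := by omega
        by_cases he : (2:Int) ∣ ones
        · have := ih (acc ++ pol :: '0' :: '0' :: [pol]) pol 0 0 (by omega) (by omega)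
          have hsl : PySem.List.slice (acc ++ ['0', '0', '0']) none (some (-3)) = acc := by
            rw [PySem.List.slice_to_neg_ofNat _ 3 (by omega)]
            simp
          simpa [pvStepA, pvStepD, pvBlock, h1, h4, PySem.Int.mod_eq_zero_iff_dvd, he, hz, hsl] using this
        · have := ih (acc ++ '0' :: '0' :: '0' :: [pol]) pol 0 0 (by omega) (by omega)
          simpa [pvStepA, pvStepD, h1, h4, PySem.Int.mod_eq_zero_iff_dvd, he, hz, List.replicate_succ] using this
      · have := ih acc pol (zeros + 1) ones (by omega) (by omega)
        have hrep : List.replicate (zeros + 1).toNat '0'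
            = List.replicate zeros.toNat '0' ++ ['0'] := by
          have : (zeros + 1).toNat = zeros.toNat + 1 := by omega
          rw [this, List.replicate_succ']
        simpa [pvStepA, pvStepD, h1, h4, hrep] using this

-- the deferred step ignores the actual character in the non-'1' branch
theorem pv_foldD_non1 (l : List Char) (st : List Char × Char × Int × Int)
    (h : ∀ x ∈ l, ¬ x = '1') :
    l.foldl pvStepD st = (List.replicate l.length '0').foldl pvStepD st := by
  induction l generalizing st with
  | nil => rfl
  | cons c l ih =>
    have hc : ¬ c = '1' := h c (by simp)
    have : pvStepD st c = pvStepD st '0' := by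
      obtain ⟨a, b, z, o⟩ := st
      simp [pvStepD, hc]
    simp only [List.foldl_cons, this]
    exact ih _ (fun x hx => h x (by simp [hx]))

-- four zeros produce one substitution block and reset both counters
theorem pv_foldD_four (acc : List Char) (pol : Char) (ones : Int) :
    (List.replicate 4 '0').foldl pvStepD (acc, pol, 0, ones)
      = (acc ++ (if PySem.Int.mod ones 2 = 0 then pvBlock pol else '0' :: '0' :: '0' :: [pol]),
         pol, 0, 0) := by
  by_cases he : PySem.Int.mod ones 2 = 0 <;>
    simp [List.replicate, pvStepD]

-- fewer than four zeros stay pending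
theorem pv_foldD_small (r : Nat) (hr : r < 4) (acc : List Char) (pol : Char) (ones : Int) :
    (List.replicate r '0').foldl pvStepD (acc, pol, 0, ones)
      = (acc, pol, (r : Int), ones) := by
  interval_cases r <;> simp [List.replicate, pvStepD]

theorem pv_blocks_pred (pol : Char) (j : Nat) :
    (if j = 0 then [] else pvBlock pol ++ pvBlocks pol (j - 1)) = pvBlocks pol j := by
  cases j <;> simp [pvBlocks]

-- a run of k zeros under the deferred loop
theorem pv_foldD_zrun (k : Nat) (acc : List Char) (pol : Char) (ones : Int) :
    (List.replicate k '0').foldl pvStepD (acc, pol, 0, ones)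
      = (acc ++ (if k / 4 = 0 then []
           else (if PySem.Int.mod ones 2 = 0 then pvBlock pol else '0' :: '0' :: '0' :: [pol])
                ++ pvBlocks pol (k / 4 - 1)),
         pol, ((k % 4 : Nat) : Int), if k / 4 = 0 then ones else 0) := by
  induction k using Nat.strong_induction_on generalizing acc ones with
  | _ k ih =>
    by_cases hk : k < 4
    · have h40 : k / 4 = 0 := by omega
      have hm : k % 4 = k := by omega
      rw [pv_foldD_small k hk]
      simp [h40, hm]
    · have hsplit : List.replicate k '0'
          = List.replicate 4 '0' ++ List.replicate (k - 4) '0' := by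
        rw [← List.replicate_add]; congr 1; omega
      rw [hsplit, List.foldl_append, pv_foldD_four,
        ih (k - 4) (by omega)]
      have hin : (if PySem.Int.mod 0 2 = 0 then pvBlock pol else '0' :: '0' :: '0' :: [pol])
          = pvBlock pol := if_pos (by decide)
      rw [hin, pv_blocks_pred]
      have hq : k / 4 - 1 = (k - 4) / 4 := by omega
      have hr : k % 4 = (k - 4) % 4 := by omega
      have hq0 : ¬ k / 4 = 0 := by omega
      simp [hq, hr, hq0]

-- head of a dropWhile, if present, falsifies the predicate
theorem pv_dropWhile_head (p : Char → Bool) (l : List Char) (e : Char) (d' : List Char)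
    (h : l.dropWhile p = e :: d') : p e = false := by
  induction l with
  | nil => simp at h
  | cons c cs ih =>
    by_cases hc : p c = true
    · rw [List.dropWhile_cons_of_pos hc] at h; exact ih h
    · rw [List.dropWhile_cons_of_neg hc] at h
      cases h; simpa using hc

-- peeling a single leading '1' off B's run decomposition
theorem pv_runs_peel_one (d' : List Char) (pol : Char) (parity : Int) :
    pvEncodeRuns ('1' :: d') pol parity
      = pol :: pvEncodeRuns d' (pvFlip pol) (PySem.Int.mod (parity + 1) 2) := by
  rw [pvEncodeRuns]
  rw [List.takeWhile_cons_of_pos (by decide), List.dropWhile_cons_of_pos (by decide), if_pos rfl]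
  cases d' with
  | nil => simp [pvEncodeRuns, pvOnesOut, pvFlipIter]
  | cons f d'' =>
    by_cases hf : f = '1'
    · rw [show pvEncodeRuns (f :: d'') (pvFlip pol) (PySem.Int.mod (parity + 1) 2)
          = pvOnesOut (pvFlip pol) (List.takeWhile (fun b => b = '1') (f :: d'')).length
            ++ pvEncodeRuns (List.dropWhile (fun b => b = '1') (f :: d''))
                 (pvFlipIter (pvFlip pol) (List.takeWhile (fun b => b = '1') (f :: d'')).length)
                 (PySem.Int.mod (PySem.Int.mod (parity + 1) 2
                    + ((List.takeWhile (fun b => b = '1') (f :: d'')).length : Int)) 2) by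
        rw [pvEncodeRuns]; simp [hf]]
      have hmod : ∀ m : Nat, PySem.Int.mod (parity + ((m + 1 : Nat) : Int)) 2
          = PySem.Int.mod (PySem.Int.mod (parity + 1) 2 + (m : Int)) 2 := by
        intro m
        simp only [pv_mod2]
        omega
      dsimp only
      simp only [List.length_cons]
      rw [hmod]
      simp [pvOnesOut, pvFlipIter]
    · have ht : List.takeWhile (fun b => b = '1') (f :: d'') = [] := by
        simp [List.takeWhile, hf]
      have hdw : List.dropWhile (fun b => b = '1') (f :: d'') = f :: d'' := by
        simp [List.dropWhile, hf]
      simp [ht, hdw, pvOnesOut, pvFlipIter]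

-- Main bridge: the deferred loop's flushed output equals B's run decomposition.
theorem pv_runs_eq (l : List Char) (acc : List Char) (pol : Char) (ones parity : Int)
    (hp : PySem.Int.mod ones 2 = parity) :
    (l.foldl pvStepD (acc, pol, 0, ones)).1
      ++ List.replicate (l.foldl pvStepD (acc, pol, 0, ones)).2.2.1.toNat '0'
      = acc ++ pvEncodeRuns l pol parity := by
  induction hn : l.length using Nat.strong_induction_on generalizing l acc pol ones parity with
  | _ n ih =>
    cases l with
    | nil => simp [pvEncodeRuns]
    | cons c rest =>
      by_cases h1 : c = '1'
      · -- one '1' step, then recurse on rest (which is shorter)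
        subst h1
        have hstep : ('1' :: rest).foldl pvStepD (acc, pol, 0, ones)
            = rest.foldl pvStepD (acc ++ [pol], pvToggle pol, 0, ones + 1) := by
          simp [pvStepD]
        rw [hstep, ih rest.length (by simp [← hn]) rest _ _ (ones + 1)
              (PySem.Int.mod (parity + 1) 2)
              (by simp only [pv_mod2] at *; omega) rfl,
            pv_runs_peel_one]
        simp [pvToggle, pvFlip]
      · -- run of non-'1' characters taken as a whole
        set t := List.takeWhile (fun b => ¬ b = '1') (c :: rest) with ht
        set d := List.dropWhile (fun b => ¬ b = '1') (c :: rest) with hd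
        have hsplit : c :: rest = t ++ d := (List.takeWhile_append_dropWhile).symm
        have htpos : 0 < t.length := by
          rw [ht]; simp [List.takeWhile, h1]
        have hlen : t.length + d.length = n := by
          rw [← hn, hsplit]; simp
        have hall : ∀ x ∈ t, ¬ x = '1' := by
          intro x hx
          have := List.mem_takeWhile_imp (ht ▸ hx)
          simpa using this
        have hstep : (c :: rest).foldl pvStepD (acc, pol, 0, ones)
            = d.foldl pvStepD ((List.replicate t.length '0').foldl pvStepD (acc, pol, 0, ones)) := by
          conv_lhs => rw [hsplit]
          rw [List.foldl_append, pv_foldD_non1 t _ hall]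
        have hrhs : pvEncodeRuns (c :: rest) pol parity
            = pvZerosOut pol parity t.length ++ pvEncodeRuns d pol
                (if t.length / 4 = 0 then parity else 0) := by
          rw [pvEncodeRuns]; simp [h1, ht, hd]
        rw [hstep, pv_foldD_zrun, hrhs]
        cases hdc : d with
        | nil =>
          simp only [List.foldl_nil, pvEncodeRuns, List.append_nil, pvZerosOut]
          rw [← hp]
          by_cases h40 : t.length / 4 = 0 <;> simp [h40] <;> omega
        | cons e d' =>
          have he1 : e = '1' := by
            have := pv_dropWhile_head _ _ _ _ (hd.symm ▸ hdc)
            simpa using this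
          subst he1
          have hflush : ∀ (o2 : Int) (acc2 : List Char),
              pvStepD (acc2, pol, ((t.length % 4 : Nat) : Int), o2) '1'
                = (acc2 ++ List.replicate (t.length % 4) '0' ++ [pol], pvToggle pol, 0, o2 + 1) := by
            intro o2 acc2
            simp [pvStepD]
            omega
          simp only [List.foldl_cons]
          rw [hflush]
          have hp2 : PySem.Int.mod ((if t.length / 4 = 0 then ones else 0) + 1) 2
              = PySem.Int.mod ((if t.length / 4 = 0 then parity else 0) + 1) 2 := by
            by_cases h40 : t.length / 4 = 0 <;> simp only [h40, if_true, if_false] <;>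
              simp only [pv_mod2] at * <;> omega
          rw [ih d'.length (by rw [hdc] at hlen; simp at hlen; omega) d' _ _ _ _ hp2 rfl,
            pv_runs_peel_one]
          simp only [pvZerosOut, pvToggle, pvFlip, ← hp]
          simp [List.append_assoc]

-- ===== VERDICT (by name: the statement is the Claim_ definition above) =====
theorem hdb3_spec : Claim_equal_hdb3 := by
  intro s _
  unfold Spec_hdb3 hdb3 hdb3_alt
  have h := pv_loop_eq s.toList [] '1' 0 0 (by omega) (by omega)
  simp only [List.replicate_zero, List.append_nil, Int.toNat_zero] at h
  rw [h, pv_runs_eq s.toList [] '1' 0 0 (by decide)]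
  simp
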